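-- pv_equiv track=rewrite | github.com/viorabuild/reports_clickup | src/clickup_agent.py | _split_history_entries
-- ===== SOURCE A (Python) =====
-- from typing import Any, Dict, List, Optional, Tuple
--
-- def _split_history_entries(raw_content: str) -> List[str]:
--     if not raw_content.strip():
--         return []
--     lines = raw_content.splitlines()
--     entries: List[str] = []
--     current: List[str] = []
--     for line in lines:
--         current.append(line)
--         if line.strip() == "---":
--             entry = "\n".join(current).strip()
--             if entry:
--                 entries.append(entry)
--             current = []
--     if current and any(line.strip() for line in current):
--         entry = "\n".join(current).strip()
--         if entry:
--             entries.append(entry)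
--     return entries
-- ===== SOURCE B (Python) =====
-- from typing import List
--
--
-- def _split_history_entries(raw_content: str) -> List[str]:
--     if not raw_content.strip():
--         return []
--     return _collect(raw_content.splitlines())
--
--
-- def _collect(lines: List[str]) -> List[str]:
--     # Peel off the first segment (up to and including the first '---' line),
--     # emit it if non-blank, and recurse on the remainder.
--     head: List[str] = []
--     rest = lines
--     while rest and rest[0].strip() != "---":
--         head.append(rest[0])
--         rest = rest[1:]
--     if not rest:
--         tail = "\n".join(head).strip()
--         return [tail] if tail else []
--     entry = "\n".join(head + [rest[0]]).strip()
--     return ([entry] if entry else []) + _collect(rest[1:])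
-- ===== Notes on version B (the rewrite author's own statement) =====
-- stated objective: alternative
-- what changed: Replaces A's single accumulator fold carrying (entries, current) state plus a post-loop tail check by a recursive helper that peels off one segment at a time: scan to the first separator line, join-strip-emit that segment, recurse on the remainder.
import Mathlib
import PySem

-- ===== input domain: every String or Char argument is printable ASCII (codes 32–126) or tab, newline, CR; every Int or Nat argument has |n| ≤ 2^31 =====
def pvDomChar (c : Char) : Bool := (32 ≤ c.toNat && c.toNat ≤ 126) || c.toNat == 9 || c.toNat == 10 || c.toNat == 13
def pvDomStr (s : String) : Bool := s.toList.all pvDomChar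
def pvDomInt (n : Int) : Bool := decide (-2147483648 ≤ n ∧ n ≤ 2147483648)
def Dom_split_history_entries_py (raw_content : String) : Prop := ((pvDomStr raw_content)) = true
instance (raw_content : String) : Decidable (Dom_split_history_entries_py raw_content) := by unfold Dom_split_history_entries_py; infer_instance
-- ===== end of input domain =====

-- B recursively peels off one segment at a time (scan to the first '---' line, emit, recurse)
-- instead of A's single fold carrying (entries, current) state; objective: alternative decomposition.

-- ===== PORT A =====
-- the for-loop over lines with state (entries, current); the [] case is the post-loop tail check
def pvALoop (lines entries current : List String) : List String :=
  match lines with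
  | [] =>
    if current ≠ [] ∧ ∃ l ∈ current, PySem.Str.strip l ≠ "" then
      let entry := PySem.Str.strip (PySem.Str.join "\n" current)
      if entry ≠ "" then entries ++ [entry] else entries
    else entries
  | line :: rest =>
    let current' := current ++ [line]
    if PySem.Str.strip line = "---" then
      let entry := PySem.Str.strip (PySem.Str.join "\n" current')
      pvALoop rest (if entry ≠ "" then entries ++ [entry] else entries) []
    else pvALoop rest entries current'

def split_history_entries_py (raw_content : String) : List String :=
  if PySem.Str.strip raw_content = "" then []
  else pvALoop (PySem.Str.splitlines raw_content) [] []

-- ===== PORT B =====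
-- the while loop of _collect: advance until the first '---' line, returning (head, rest)
def pvSpanSep (lines : List String) : List String × List String :=
  match lines with
  | [] => ([], [])
  | l :: ls =>
    if PySem.Str.strip l = "---" then ([], l :: ls)
    else
      let p := pvSpanSep ls
      (l :: p.1, p.2)

theorem pvSpanSep_snd_len (lines : List String) : (pvSpanSep lines).2.length ≤ lines.length := by
  induction lines with
  | nil => simp [pvSpanSep]
  | cons l ls ih =>
    simp only [pvSpanSep]
    split
    · simp
    · simpa using Nat.le_succ_of_le ih

def pvCollect (lines : List String) : List String :=
  match h : pvSpanSep lines with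
  | (head, []) =>
    let tail := PySem.Str.strip (PySem.Str.join "\n" head)
    if tail ≠ "" then [tail] else []
  | (head, sep :: rest) =>
    let entry := PySem.Str.strip (PySem.Str.join "\n" (head ++ [sep]))
    (if entry ≠ "" then [entry] else []) ++ pvCollect rest
termination_by lines.length
decreasing_by
  have h2 := pvSpanSep_snd_len lines
  rw [h] at h2
  simp at h2
  omega

def split_history_entries_py_alt (raw_content : String) : List String :=
  if PySem.Str.strip raw_content = "" then []
  else pvCollect (PySem.Str.splitlines raw_content)

-- ===== PRECONDITION & SPEC =====
def Spec_split_history_entries_py (raw_content : String) (out : List String) : Prop := out = split_history_entries_py_alt raw_content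
instance (raw_content : String) (out : List String) : Decidable (Spec_split_history_entries_py raw_content out) := by unfold Spec_split_history_entries_py; infer_instance

-- ===== CLAIM (what is proved, stated in full; the proofs are below) =====
def Claim_equal_split_history_entries_py : Prop := ∀ (raw_content : String), Dom_split_history_entries_py raw_content → Spec_split_history_entries_py raw_content (split_history_entries_py raw_content)

-- ===== LEMMAS AND PROOFS =====

theorem all_space_of_strip_nil (x : List Char) (h : PySem.Chars.strip x = []) :
    ∀ c ∈ x, PySem.Chars.isspace c = true := by
  simp only [PySem.Chars.strip, PySem.Chars.rstrip, PySem.Chars.lstrip] at h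
  rw [List.reverse_eq_nil_iff, List.dropWhile_eq_nil_iff] at h
  intro c hc
  rcases List.mem_append.mp (by
      rw [List.takeWhile_append_dropWhile]
      exact hc :
      c ∈ x.takeWhile PySem.Chars.isspace ++ x.dropWhile PySem.Chars.isspace) with h1 | h2
  · exact List.mem_takeWhile_imp h1
  · exact h c (List.mem_reverse.mpr h2)

theorem strip_nil_of_all_space (x : List Char) (h : ∀ c ∈ x, PySem.Chars.isspace c = true) :
    PySem.Chars.strip x = [] := by
  simp only [PySem.Chars.strip, PySem.Chars.rstrip, PySem.Chars.lstrip]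
  rw [List.dropWhile_eq_nil_iff.mpr h]
  simp

theorem join_all_space (parts : List (List Char))
    (h : ∀ p ∈ parts, ∀ c ∈ p, PySem.Chars.isspace c = true) :
    ∀ c ∈ PySem.Chars.join ['\n'] parts, PySem.Chars.isspace c = true := by
  induction parts with
  | nil => simp [PySem.Chars.join, List.intercalate]
  | cons a t ih =>
    cases t with
    | nil =>
      simpa [PySem.Chars.join, List.intercalate] using h a (by simp)
    | cons b t' =>
      intro c hc
      rw [PySem.Chars.join_cons_cons] at hc
      rcases List.mem_append.mp hc with h1 | h2
      · rcases List.mem_append.mp h1 with ha | hs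
        · exact h a (by simp) c ha
        · simp only [List.mem_singleton] at hs
          subst hs; decide
      · exact ih (fun p hp => h p (by simp [hp])) c h2

theorem strip_join_blank (cs : List String) (h : ∀ l ∈ cs, PySem.Str.strip l = "") :
    PySem.Str.strip (PySem.Str.join "\n" cs) = "" := by
  have hx : ∀ l ∈ cs, ∀ c ∈ l.toList, PySem.Chars.isspace c = true := by
    intro l hl
    apply all_space_of_strip_nil
    have := congrArg String.toList (h l hl)
    simpa using this
  apply String.ext
  have : (PySem.Str.strip (PySem.Str.join "\n" cs)).toList = [] := by
    rw [PySem.Str.toList_strip, PySem.Str.toList_join]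
    apply strip_nil_of_all_space
    have : ("\n" : String).toList = ['\n'] := by decide
    rw [this]
    apply join_all_space
    intro p hp
    rcases List.mem_map.mp hp with ⟨l, hl, rfl⟩
    exact hx l hl
  simpa [String.toList] using this

theorem pvSpanSep_sepFree (cs : List String) (h : ∀ l ∈ cs, PySem.Str.strip l ≠ "---") :
    pvSpanSep cs = (cs, []) := by
  induction cs with
  | nil => simp [pvSpanSep]
  | cons a t ih =>
    simp only [pvSpanSep]
    rw [if_neg (h a (by simp)), ih (fun l hl => h l (by simp [hl]))]

theorem pvSpanSep_split (cs : List String) (l : String) (ls : List String)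
    (hcs : ∀ x ∈ cs, PySem.Str.strip x ≠ "---") (hl : PySem.Str.strip l = "---") :
    pvSpanSep (cs ++ l :: ls) = (cs, l :: ls) := by
  induction cs with
  | nil => simp [pvSpanSep, hl]
  | cons a t ih =>
    simp only [List.cons_append, pvSpanSep]
    rw [if_neg (hcs a (by simp)), ih (fun x hx => hcs x (by simp [hx]))]

theorem pvCollect_sep (cs : List String) (l : String) (ls : List String)
    (hcs : ∀ x ∈ cs, PySem.Str.strip x ≠ "---") (hl : PySem.Str.strip l = "---") :
    pvCollect (cs ++ l :: ls) =
      (if PySem.Str.strip (PySem.Str.join "\n" (cs ++ [l])) ≠ "" then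
        [PySem.Str.strip (PySem.Str.join "\n" (cs ++ [l]))] else []) ++ pvCollect ls := by
  rw [pvCollect.eq_def]
  split
  case _ head heq =>
    rw [pvSpanSep_split cs l ls hcs hl] at heq
    exact absurd heq (by simp)
  case _ head sep rest heq =>
    rw [pvSpanSep_split cs l ls hcs hl] at heq
    simp only [Prod.mk.injEq, List.cons.injEq] at heq
    obtain ⟨rfl, rfl, rfl⟩ := heq
    rfl

theorem pvCollect_sepFree (cs : List String) (hcs : ∀ x ∈ cs, PySem.Str.strip x ≠ "---") :
    pvCollect cs =
      (if PySem.Str.strip (PySem.Str.join "\n" cs) ≠ "" then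
        [PySem.Str.strip (PySem.Str.join "\n" cs)] else []) := by
  rw [pvCollect.eq_def]
  split
  case _ head heq =>
    rw [pvSpanSep_sepFree cs hcs] at heq
    simp only [Prod.mk.injEq] at heq
    obtain ⟨rfl, -⟩ := heq
    rfl
  case _ head sep rest heq =>
    rw [pvSpanSep_sepFree cs hcs] at heq
    exact absurd heq (by simp)

theorem pvALoop_eq_pvCollect (lines : List String) :
    ∀ current entries, (∀ l ∈ current, PySem.Str.strip l ≠ "---") →
    pvALoop lines entries current = entries ++ pvCollect (current ++ lines) := by
  induction lines with
  | nil =>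
    intro current entries hcur
    simp only [pvALoop, List.append_nil]
    rw [pvCollect_sepFree current hcur]
    by_cases hne : current ≠ [] ∧ ∃ l ∈ current, PySem.Str.strip l ≠ ""
    · rw [if_pos hne]
      by_cases he : PySem.Str.strip (PySem.Str.join "\n" current) ≠ ""
      · simp [he]
      · simp [he]
    · rw [if_neg hne]
      have hblank : PySem.Str.strip (PySem.Str.join "\n" current) = "" := by
        rcases not_and_or.mp hne with h1 | h2
        · have : current = [] := not_not.mp h1
          subst this
          apply strip_join_blank; simp
        · rw [not_exists] at h2
          simp only [not_and, not_not] at h2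
          exact strip_join_blank current h2
      simp [hblank]
  | cons line rest ih =>
    intro current entries hcur
    simp only [pvALoop]
    by_cases hsep : PySem.Str.strip line = "---"
    · rw [if_pos hsep]
      rw [ih [] _ (by simp)]
      rw [show current ++ line :: rest = (current ++ line :: []) ++ rest by simp]
      rw [show (current ++ line :: []) ++ rest = current ++ line :: rest by simp] -- keep shape
      rw [pvCollect_sep current line rest hcur hsep]
      by_cases he : PySem.Str.strip (PySem.Str.join "\n" (current ++ [line])) ≠ ""
      · simp [he]
      · simp [he]
    · rw [if_neg hsep]
      rw [ih (current ++ [line]) entries (by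
        intro l hl
        rcases List.mem_append.mp hl with h1 | h2
        · exact hcur l h1
        · simp only [List.mem_singleton] at h2; subst h2; exact hsep)]
      simp

-- ===== VERDICT (by name: the statement is the Claim_ definition above) =====
theorem split_history_entries_py_spec : Claim_equal_split_history_entries_py := by
  intro raw _
  unfold Spec_split_history_entries_py split_history_entries_py split_history_entries_py_alt
  by_cases h : PySem.Str.strip raw = ""
  · simp [h]
  · rw [if_neg h, if_neg h]
    simpa using pvALoop_eq_pvCollect (PySem.Str.splitlines raw) [] [] (by simp)
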